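-- pv_equiv track=rewrite | github.com/superchee/CS5421 | projects/project2/project2.py | all_closures_self
-- ===== SOURCE A (Python) =====
-- import copy
-- import itertools
--
-- def closure(R, F, S):
--     unused_F = copy.copy(F)
--     S_closure = copy.copy(S)
--
--     while len(unused_F) > 0:
--         bFind = False
--         unused_F_copy = copy.copy(unused_F)
--         for per in unused_F:
--             if set(per[0]).issubset(S_closure): #add the attributes if X in closure
--                 S_closure += list( set(per[1]) - set(S_closure) )
--                 unused_F_copy.remove(per)
--                 bFind = True
--                 break
--         if bFind == False:
--             break #break when no more attributes can be found
--         unused_F = copy.copy(unused_F_copy)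
--     return sorted(S_closure)
--
-- def all_closures_self(R, F):
--
--     all_closure = []
--     candidate_keys = []
--
--     for i in range(1,len(R)+1):
--         for itr in list(itertools.combinations(R,i)):
--             #check superkeys that are not candidate keys
--             # if any(set(perList).issubset(list(itr)) for perList in candidate_keys ):
--             #     continue
--             temp_closure = closure(R,F,list(itr))
--             all_closure.append([list(itr),temp_closure])
--             #find candidate keys
--             if(len(temp_closure) == len(R)):
--                 candidate_keys.append(list(itr))
--     return sorted(all_closure)
-- ===== SOURCE B (Python) =====
-- import itertools
--
--
-- def _closure(rules, attrs):
--     # saturate to a fixpoint by whole passes, collecting new attributes in order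
--     result = list(attrs)
--     have = set(attrs)
--     changed = True
--     while changed:
--         changed = False
--         for lhs, rhs in rules:
--             if lhs <= have:
--                 for a in rhs:
--                     if a not in have:
--                         have.add(a)
--                         result.append(a)
--                         changed = True
--     return sorted(result)
--
--
-- def all_closures_self(R, F):
--     rules = [(set(f[0]), set(f[1])) for f in F]
--     return sorted([[list(itr), _closure(rules, itr)]
--                    for i in range(1, len(R) + 1)
--                    for itr in itertools.combinations(R, i)])
-- ===== Notes on version B (the rewrite author's own statement) =====
-- stated objective: alternative
-- what changed: Per subset, the restart-on-first-fire closure over a consumable copy of F is replaced by whole-pass saturation to a fixpoint, collecting newly derived attributes into an ordered result list deduplicated by a seen-set, over (lhs,rhs) character-set rules precomputed once for all 2^|R| subsets; Pre_ excludes F rules shorter than 2 entries, on which B's eager f[1] indexing raises IndexError while A may still return.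
-- outside the precondition, e.g. on all_closures_self(['A'], [['Z']]): A returns [[['A'], ['A']]], B raises IndexError
import Mathlib
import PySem

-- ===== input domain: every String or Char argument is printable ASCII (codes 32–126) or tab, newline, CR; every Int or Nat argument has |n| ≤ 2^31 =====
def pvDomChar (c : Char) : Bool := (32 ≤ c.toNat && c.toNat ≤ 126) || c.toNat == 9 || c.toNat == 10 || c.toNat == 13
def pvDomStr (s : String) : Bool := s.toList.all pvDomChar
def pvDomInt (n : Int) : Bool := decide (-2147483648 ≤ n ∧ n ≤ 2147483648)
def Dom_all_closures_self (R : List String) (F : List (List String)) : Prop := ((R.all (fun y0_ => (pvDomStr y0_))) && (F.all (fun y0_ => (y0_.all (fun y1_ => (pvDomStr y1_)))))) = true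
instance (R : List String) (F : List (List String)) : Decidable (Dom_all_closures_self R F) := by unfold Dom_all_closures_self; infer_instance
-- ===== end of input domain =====

-- B replaces A's restart-on-first-fire closure (rescanning a consumable copy of F after
-- every single firing) by whole-pass saturation of an attribute set to a fixpoint over
-- (lhs,rhs) character-set rules precomputed once; the output is proved identical on Pre_.

-- set(s) of the characters of a Python string = set of its 1-character strings
def strSet (s : String) : PySem.Set String := PySem.Set.ofList (s.toList.map (fun c => c.toString))

-- ===== PORT A =====
-- the while loop of closure(): fuel = len(unused_F) bounds the number of iterations
-- (each iteration removes the fired rule from unused_F, or breaks)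
def closureGo : Nat → List (List String) → List String → List String
  | 0, _, Sc => Sc
  | n + 1, unused, Sc =>
    if unused.isEmpty then Sc
    else
      match unused.find? (fun per => PySem.Set.issubset (strSet (per.getD 0 "")) Sc) with
      | none => Sc   -- bFind == False: no rule applicable
      | some per =>
          closureGo n (unused.erase per) (Sc ++ PySem.Set.diff (strSet (per.getD 1 "")) Sc)

def closureA (R : List String) (F : List (List String)) (S : List String) : List String :=
  PySem.List.sorted (closureGo F.length F S) (fun x => x) false

-- candidate_keys of A is dead state (its only use is commented out), so it is not carried here
def all_closures_self (R : List String) (F : List (List String)) : List (List (List String)) :=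
  PySem.List.sorted
    ((PySem.List.pyRange 1 (R.length + 1) 1).foldl
      (fun acc i => acc ++ (PySem.List.combinations R i.toNat).map
        (fun itr => [itr, closureA R F itr])) [])
    (fun x => x) false

-- ===== PORT B =====
def ruleOf (f : List String) : PySem.Set String × PySem.Set String :=
  (strSet (f.getD 0 ""), strSet (f.getD 1 ""))

-- loop state: (result, have, changed)
abbrev BSt : Type := List String × PySem.Set String × Bool

-- 'if a not in have: have.add(a); result.append(a); changed = True'
def bAdd (st : BSt) (a : String) : BSt :=
  if a ∈ st.2.1 then st else (st.1 ++ [a], PySem.Set.add st.2.1 a, true)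

-- 'for a in rhs: …'
def bFire (st : BSt) (r : PySem.Set String × PySem.Set String) : BSt :=
  r.2.foldl bAdd st

-- 'if lhs <= have: …'
def bStep (st : BSt) (r : PySem.Set String × PySem.Set String) : BSt :=
  if PySem.Set.issubset r.1 st.2.1 then bFire st r else st

-- one 'for lhs, rhs in rules' pass, entered with changed = False
def bPass (rules : List (PySem.Set String × PySem.Set String))
    (p : List String × PySem.Set String) : BSt :=
  rules.foldl bStep (p.1, p.2, false)

-- the while-changed loop; fuel = (total size of all rhs sets) + 1 provably suffices,
-- since every changed pass strictly grows the nodup set 'have'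
def bLoopP (rules : List (PySem.Set String × PySem.Set String)) :
    Nat → List String × PySem.Set String → List String × PySem.Set String
  | 0, p => p
  | n + 1, p =>
    let q := bPass rules p
    if q.2.2 then bLoopP rules n (q.1, q.2.1) else (q.1, q.2.1)

def bClosure (rules : List (PySem.Set String × PySem.Set String)) (attrs : List String) :
    List String :=
  PySem.List.sorted
    (bLoopP rules ((rules.map (fun r => r.2.length)).sum + 1)
      (attrs, PySem.Set.ofList attrs)).1
    (fun x => x) false

def all_closures_self_alt (R : List String) (F : List (List String)) : List (List (List String)) :=
  let rules := F.map ruleOf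
  PySem.List.sorted
    ((PySem.List.pyRange 1 (R.length + 1) 1).flatMap
      (fun i => (PySem.List.combinations R i.toNat).map
        (fun itr => [itr, bClosure rules itr])))
    (fun x => x) false

-- ===== PRECONDITION & SPEC =====
-- Pre_ excludes F containing a rule list with fewer than 2 entries: there Python A raises
-- IndexError (per[0]/per[1]) except when the short rule's LHS never becomes applicable,
-- while B, which indexes f[1] eagerly when building its rule list, raises IndexError.
def Pre_all_closures_self (R : List String) (F : List (List String)) : Prop :=
  ∀ f ∈ F, 2 ≤ f.length
instance (R : List String) (F : List (List String)) : Decidable (Pre_all_closures_self R F) := by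
  unfold Pre_all_closures_self; infer_instance
def pvWitness_all_closures_self : List String × List (List String) :=
  (["A", "B"], [["A", "B"], ["B", "C"]])

def Spec_all_closures_self (R : List String) (F : List (List String)) (out : List (List (List String))) : Prop := out = all_closures_self_alt R F
instance (R : List String) (F : List (List String)) (out : List (List (List String))) : Decidable (Spec_all_closures_self R F out) := by unfold Spec_all_closures_self; infer_instance

-- ===== CLAIM (what is proved, stated in full; the proofs are below) =====
def Claim_equal_all_closures_self : Prop := ∀ (R : List String) (F : List (List String)), Dom_all_closures_self R F → Pre_all_closures_self R F → Spec_all_closures_self R F (all_closures_self R F)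

-- ===== LEMMAS AND PROOFS =====


theorem closureGo_zero (unused : List (List String)) (Sc : List String) :
    closureGo 0 unused Sc = Sc := rfl

theorem closureGo_succ_empty (n : Nat) (unused : List (List String)) (Sc : List String)
    (he : unused.isEmpty = true) : closureGo (n + 1) unused Sc = Sc := by
  simp only [closureGo, he, if_true]

theorem closureGo_succ_none (n : Nat) (unused : List (List String)) (Sc : List String)
    (he : unused.isEmpty = false)
    (hf : unused.find? (fun per => PySem.Set.issubset (strSet (per.getD 0 "")) Sc) = none) :
    closureGo (n + 1) unused Sc = Sc := by
  simp only [closureGo, he, hf, Bool.false_eq_true, if_false]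

theorem closureGo_succ_some (n : Nat) (unused : List (List String)) (Sc : List String)
    (per : List String) (he : unused.isEmpty = false)
    (hf : unused.find? (fun per => PySem.Set.issubset (strSet (per.getD 0 "")) Sc) = some per) :
    closureGo (n + 1) unused Sc =
      closureGo n (unused.erase per) (Sc ++ PySem.Set.diff (strSet (per.getD 1 "")) Sc) := by
  simp only [closureGo, he, hf, Bool.false_eq_true, if_false]

-- the least set of attribute strings derivable from S by the rules
inductive Reach (rules : List (PySem.Set String × PySem.Set String)) (S : List String) :
    String → Prop
  | init {a : String} : a ∈ S → Reach rules S a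
  | step {r : PySem.Set String × PySem.Set String} {a : String} :
      r ∈ rules → (∀ b ∈ r.1, Reach rules S b) → a ∈ r.2 → Reach rules S a

theorem reach_min {rules : List (PySem.Set String × PySem.Set String)} {S T : List String}
    (hS : ∀ a ∈ S, a ∈ T)
    (hC : ∀ r ∈ rules, (∀ b ∈ r.1, b ∈ T) → ∀ a ∈ r.2, a ∈ T) :
    ∀ a, Reach rules S a → a ∈ T := by
  intro a h
  induction h with
  | init h => exact hS _ h
  | step hr hpre ha ih => exact hC _ hr (fun b hb => ih b hb) _ ha

theorem nodup_subset_length {α : Type} [DecidableEq α] {l₁ l₂ : List α}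
    (h₁ : l₁.Nodup) (h : l₁ ⊆ l₂) : l₁.length ≤ l₂.length := by
  have hsub : l₁.toFinset ⊆ l₂.toFinset := by
    intro a ha; simp only [List.mem_toFinset] at *; exact h ha
  have hc := Finset.card_le_card hsub
  rw [List.toFinset_card_of_nodup h₁] at hc
  exact hc.trans (List.toFinset_card_le l₂)

-- ---- A side ----

theorem closureGo_shape : ∀ (n : Nat) (unused : List (List String)) (Sc : List String),
    ∃ ext, closureGo n unused Sc = Sc ++ ext ∧ ext.Nodup ∧ ∀ a ∈ ext, a ∉ Sc := by
  intro n
  induction n with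
  | zero => intro unused Sc; exact ⟨[], by rw [closureGo_zero, List.append_nil], List.nodup_nil, by simp⟩
  | succ n ih =>
    intro unused Sc
    cases he : unused.isEmpty with
    | true => exact ⟨[], by rw [closureGo_succ_empty _ _ _ he, List.append_nil], List.nodup_nil, by simp⟩
    | false =>
      cases hf : unused.find? (fun per => PySem.Set.issubset (strSet (per.getD 0 "")) Sc) with
      | none => exact ⟨[], by rw [closureGo_succ_none _ _ _ he hf, List.append_nil], List.nodup_nil, by simp⟩
      | some per =>
        obtain ⟨ext, heq, hnd, hni⟩ :=
          ih (unused.erase per) (Sc ++ PySem.Set.diff (strSet (per.getD 1 "")) Sc)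
        refine ⟨PySem.Set.diff (strSet (per.getD 1 "")) Sc ++ ext, ?_, ?_, ?_⟩
        · rw [closureGo_succ_some _ _ _ _ he hf, heq, List.append_assoc]
        · rw [List.nodup_append]
          refine ⟨PySem.Set.nodup_diff _ _ (PySem.Set.nodup_ofList _), hnd, ?_⟩
          intro a ha b hb heq
          exact hni b hb (List.mem_append_right _ (heq ▸ ha))
        · intro a ha
          rcases List.mem_append.mp ha with h | h
          · exact ((PySem.Set.mem_diff _ _ _).mp h).2
          · intro hS; exact (hni a h) (List.mem_append_left _ hS)

theorem closureGo_sound {rules : List (PySem.Set String × PySem.Set String)} {S : List String} :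
    ∀ (n : Nat) (unused : List (List String)) (Sc : List String),
    (∀ per ∈ unused, ruleOf per ∈ rules) → (∀ a ∈ Sc, Reach rules S a) →
    ∀ a ∈ closureGo n unused Sc, Reach rules S a := by
  intro n
  induction n with
  | zero => intro unused Sc _ hSc a ha; rw [closureGo_zero] at ha; exact hSc a ha
  | succ n ih =>
    intro unused Sc hU hSc a ha
    cases he : unused.isEmpty with
    | true => rw [closureGo_succ_empty _ _ _ he] at ha; exact hSc a ha
    | false =>
      cases hf : unused.find? (fun per => PySem.Set.issubset (strSet (per.getD 0 "")) Sc) with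
      | none => rw [closureGo_succ_none _ _ _ he hf] at ha; exact hSc a ha
      | some per =>
        rw [closureGo_succ_some _ _ _ _ he hf] at ha
        have hper : per ∈ unused := List.mem_of_find?_eq_some hf
        have hcond := List.find?_some hf
        have hlhs : ∀ b ∈ strSet (per.getD 0 ""), b ∈ Sc :=
          (PySem.Set.issubset_iff _ _).mp hcond
        refine ih (unused.erase per) _ (fun p hp => hU p (List.erase_subset hp)) ?_ a ha
        intro b hb
        rcases List.mem_append.mp hb with h | h
        · exact hSc b h
        · have hb2 := ((PySem.Set.mem_diff _ _ _).mp h).1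
          exact Reach.step (hU per hper) (fun x hx => hSc x (hlhs x hx)) hb2

theorem closureGo_closed {F : List (List String)} :
    ∀ (n : Nat) (unused : List (List String)) (Sc : List String),
    unused.length ≤ n →
    (∀ per ∈ F, per ∈ unused ∨ ∀ a ∈ strSet (per.getD 1 ""), a ∈ Sc) →
    ∀ per ∈ F, (∀ b ∈ strSet (per.getD 0 ""), b ∈ closureGo n unused Sc) →
    ∀ a ∈ strSet (per.getD 1 ""), a ∈ closureGo n unused Sc := by
  intro n
  induction n with
  | zero =>
    intro unused Sc hlen hinv per hper _ a ha
    rw [closureGo_zero]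
    have hnil : unused = [] := List.eq_nil_of_length_eq_zero (Nat.le_zero.mp hlen)
    rcases hinv per hper with h | h
    · rw [hnil] at h; exact absurd h (List.not_mem_nil)
    · exact h a ha
  | succ n ih =>
    intro unused Sc hlen hinv per hper hpre a ha
    cases he : unused.isEmpty with
    | true =>
      rw [closureGo_succ_empty _ _ _ he] at hpre ⊢
      rcases hinv per hper with h | h
      · rw [List.isEmpty_iff.mp he] at h; exact absurd h (List.not_mem_nil)
      · exact h a ha
    | false =>
      cases hf : unused.find? (fun per => PySem.Set.issubset (strSet (per.getD 0 "")) Sc) with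
      | none =>
        rw [closureGo_succ_none _ _ _ he hf] at hpre ⊢
        rcases hinv per hper with h | h
        · have hno := List.find?_eq_none.mp hf per h
          simp only [Bool.not_eq_true] at hno
          have hyes : PySem.Set.issubset (strSet (per.getD 0 "")) Sc = true :=
            (PySem.Set.issubset_iff _ _).mpr hpre
          rw [hno] at hyes
          exact absurd hyes Bool.false_ne_true
        · exact h a ha
      | some per' =>
        rw [closureGo_succ_some _ _ _ _ he hf] at hpre ⊢
        have hper' : per' ∈ unused := List.mem_of_find?_eq_some hf
        refine ih (unused.erase per') _ ?_ ?_ per hper hpre a ha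
        · rw [List.length_erase_of_mem hper']; omega
        · intro q hq
          rcases hinv q hq with h | h
          · by_cases hqe : q = per'
            · right
              intro x hx
              subst hqe
              by_cases hxSc : x ∈ Sc
              · exact List.mem_append_left _ hxSc
              · exact List.mem_append_right _ ((PySem.Set.mem_diff _ _ _).mpr ⟨hx, hxSc⟩)
            · exact Or.inl ((List.mem_erase_of_ne hqe).mpr h)
          · exact Or.inr (fun x hx => List.mem_append_left _ (h x hx))

theorem mem_closureGo_iff {F : List (List String)} {S : List String} {a : String} :
    a ∈ closureGo F.length F S ↔ Reach (F.map ruleOf) S a := by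
  constructor
  · intro ha
    refine closureGo_sound F.length F S (fun per hp => List.mem_map_of_mem hp)
      (fun b hb => Reach.init hb) a ha
  · intro hr
    refine reach_min ?_ ?_ a hr
    · intro b hb
      obtain ⟨ext, heq, _, _⟩ := closureGo_shape F.length F S
      rw [heq]; exact List.mem_append_left _ hb
    · intro r hrm hb c hc
      obtain ⟨per, hper, rfl⟩ := List.mem_map.mp hrm
      exact closureGo_closed F.length F S le_rfl (fun q hq => Or.inl hq) per hper hb c hc

-- ---- B side ----

theorem bLoopP_succ (rules : List (PySem.Set String × PySem.Set String)) (n : Nat)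
    (p : List String × PySem.Set String) :
    bLoopP rules (n + 1) p =
      if (bPass rules p).2.2 then bLoopP rules n ((bPass rules p).1, (bPass rules p).2.1)
      else ((bPass rules p).1, (bPass rules p).2.1) := rfl

-- the Good invariant: 'have' is the set of members of 'result', and 'result' is the seed S
-- followed by a duplicate-free extension disjoint from S
def Good (S res : List String) (hv : PySem.Set String) : Prop :=
  hv.Nodup ∧ (∀ x, x ∈ hv ↔ x ∈ res) ∧ ∃ ext, res = S ++ ext ∧ ext.Nodup ∧ ∀ a ∈ ext, a ∉ S

theorem good_bAdd {S : List String} {st : BSt} (h : Good S st.1 st.2.1) (a : String) :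
    Good S (bAdd st a).1 (bAdd st a).2.1 := by
  unfold bAdd
  by_cases ha : a ∈ st.2.1
  · rw [if_pos ha]; exact h
  · rw [if_neg ha]
    obtain ⟨hnd, hmem, ext, hres, hend, hedis⟩ := h
    have hares : a ∉ st.1 := fun hx => ha ((hmem a).mpr hx)
    refine ⟨PySem.Set.nodup_add _ _ hnd, ?_, ext ++ [a], ?_, ?_, ?_⟩
    · intro x
      rw [PySem.Set.mem_add, List.mem_append, List.mem_singleton, hmem]
    · rw [hres, List.append_assoc]
    · rw [List.nodup_append]
      refine ⟨hend, List.nodup_singleton a, ?_⟩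
      intro x hx y hy hxy
      rw [List.mem_singleton] at hy
      subst hy; subst hxy
      exact hares (hres ▸ List.mem_append_right _ hx)
    · intro x hx
      rcases List.mem_append.mp hx with h1 | h1
      · exact hedis x h1
      · rw [List.mem_singleton] at h1
        subst h1
        exact fun hS => hares (hres ▸ List.mem_append_left _ hS)

theorem good_bFire {S : List String} {st : BSt} (h : Good S st.1 st.2.1)
    (r : PySem.Set String × PySem.Set String) : Good S (bFire st r).1 (bFire st r).2.1 := by
  unfold bFire
  induction r.2 generalizing st with
  | nil => exact h
  | cons a l ih => exact ih (good_bAdd h a)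

theorem good_bStep {S : List String} {st : BSt} (h : Good S st.1 st.2.1)
    (r : PySem.Set String × PySem.Set String) : Good S (bStep st r).1 (bStep st r).2.1 := by
  unfold bStep
  by_cases hc : PySem.Set.issubset r.1 st.2.1 = true
  · rw [if_pos hc]; exact good_bFire h r
  · rw [if_neg hc]; exact h

theorem good_foldl_bStep {S : List String} (rules : List (PySem.Set String × PySem.Set String)) :
    ∀ (st : BSt), Good S st.1 st.2.1 → Good S (rules.foldl bStep st).1 (rules.foldl bStep st).2.1 := by
  induction rules with
  | nil => intro st h; exact h
  | cons r rs ih => intro st h; exact ih (bStep st r) (good_bStep h r)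

theorem good_bLoopP {S : List String} (rules : List (PySem.Set String × PySem.Set String)) :
    ∀ (n : Nat) (p : List String × PySem.Set String), Good S p.1 p.2 →
    Good S (bLoopP rules n p).1 (bLoopP rules n p).2 := by
  intro n
  induction n with
  | zero => intro p h; exact h
  | succ n ih =>
    intro p h
    rw [bLoopP_succ]
    have hq : Good S (bPass rules p).1 (bPass rules p).2.1 :=
      good_foldl_bStep rules (p.1, p.2, false) h
    by_cases hc : (bPass rules p).2.2 = true
    · rw [if_pos hc]; exact ih ((bPass rules p).1, (bPass rules p).2.1) hq
    · rw [if_neg hc]; exact hq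

-- soundness: everything in 'have' is reachable
theorem sound_bFire {RULES : List (PySem.Set String × PySem.Set String)} {S : List String}
    {r : PySem.Set String × PySem.Set String} (hr : r ∈ RULES)
    (hlhs : ∀ b ∈ r.1, Reach RULES S b) :
    ∀ (l : List String), (∀ a ∈ l, a ∈ r.2) → ∀ (st : BSt), (∀ x ∈ st.2.1, Reach RULES S x) →
    ∀ x ∈ (l.foldl bAdd st).2.1, Reach RULES S x := by
  intro l
  induction l with
  | nil => intro _ st h; exact h
  | cons a as ih =>
    intro hsub st h
    refine ih (fun b hb => hsub b (List.mem_cons_of_mem _ hb)) (bAdd st a) ?_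
    intro x hx
    unfold bAdd at hx
    by_cases ha : a ∈ st.2.1
    · rw [if_pos ha] at hx; exact h x hx
    · rw [if_neg ha] at hx
      simp only [PySem.Set.mem_add] at hx
      rcases hx with h1 | h1
      · exact h x h1
      · exact h1 ▸ Reach.step hr hlhs (hsub a List.mem_cons_self)

theorem sound_bStep {RULES : List (PySem.Set String × PySem.Set String)} {S : List String}
    {r : PySem.Set String × PySem.Set String} (hr : r ∈ RULES) (st : BSt)
    (h : ∀ x ∈ st.2.1, Reach RULES S x) : ∀ x ∈ (bStep st r).2.1, Reach RULES S x := by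
  unfold bStep
  by_cases hc : PySem.Set.issubset r.1 st.2.1 = true
  · rw [if_pos hc]
    exact sound_bFire hr
      (fun b hb => h b ((PySem.Set.issubset_iff _ _).mp hc b hb)) r.2 (fun a ha => ha) st h
  · rw [if_neg hc]; exact h

theorem sound_foldl_bStep {RULES : List (PySem.Set String × PySem.Set String)} {S : List String}
    (rules : List (PySem.Set String × PySem.Set String)) (hr : ∀ r ∈ rules, r ∈ RULES) :
    ∀ (st : BSt), (∀ x ∈ st.2.1, Reach RULES S x) →
    ∀ x ∈ (rules.foldl bStep st).2.1, Reach RULES S x := by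
  induction rules with
  | nil => intro st h; exact h
  | cons r rs ih =>
    intro st h
    exact ih (fun q hq => hr q (List.mem_cons_of_mem _ hq)) (bStep st r)
      (sound_bStep (hr r List.mem_cons_self) st h)

theorem sound_bLoopP {RULES : List (PySem.Set String × PySem.Set String)} {S : List String}
    (rules : List (PySem.Set String × PySem.Set String)) (hr : ∀ r ∈ rules, r ∈ RULES) :
    ∀ (n : Nat) (p : List String × PySem.Set String), (∀ x ∈ p.2, Reach RULES S x) →
    ∀ x ∈ (bLoopP rules n p).2, Reach RULES S x := by
  intro n
  induction n with
  | zero => intro p h; exact h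
  | succ n ih =>
    intro p h
    rw [bLoopP_succ]
    have hq : ∀ x ∈ (bPass rules p).2.1, Reach RULES S x :=
      sound_foldl_bStep rules hr (p.1, p.2, false) h
    by_cases hc : (bPass rules p).2.2 = true
    · rw [if_pos hc]; exact ih ((bPass rules p).1, (bPass rules p).2.1) hq
    · rw [if_neg hc]; exact hq

-- 'have' stays inside the pool of seed plus all rhs attributes
theorem pool_bFire {pool : List String} {r : PySem.Set String × PySem.Set String}
    (hrp : r.2 ⊆ pool) :
    ∀ (l : List String), (∀ a ∈ l, a ∈ r.2) → ∀ (st : BSt), st.2.1 ⊆ pool →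
    (l.foldl bAdd st).2.1 ⊆ pool := by
  intro l
  induction l with
  | nil => intro _ st h; exact h
  | cons a as ih =>
    intro hsub st h
    refine ih (fun b hb => hsub b (List.mem_cons_of_mem _ hb)) (bAdd st a) ?_
    intro x hx
    unfold bAdd at hx
    by_cases ha : a ∈ st.2.1
    · rw [if_pos ha] at hx; exact h hx
    · rw [if_neg ha] at hx
      simp only [PySem.Set.mem_add] at hx
      rcases hx with h1 | h1
      · exact h h1
      · exact h1 ▸ hrp (hsub a List.mem_cons_self)

theorem pool_foldl_bStep {pool : List String}
    (rules : List (PySem.Set String × PySem.Set String)) (hrp : ∀ r ∈ rules, r.2 ⊆ pool) :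
    ∀ (st : BSt), st.2.1 ⊆ pool → (rules.foldl bStep st).2.1 ⊆ pool := by
  induction rules with
  | nil => intro st h; exact h
  | cons r rs ih =>
    intro st h
    refine ih (fun q hq => hrp q (List.mem_cons_of_mem _ hq)) (bStep st r) ?_
    unfold bStep
    by_cases hc : PySem.Set.issubset r.1 st.2.1 = true
    · rw [if_pos hc]
      exact pool_bFire (hrp r List.mem_cons_self) r.2 (fun a ha => ha) st h
    · rw [if_neg hc]; exact h

-- Nodup of 'have' is preserved
theorem nodup_bFire {r : PySem.Set String × PySem.Set String} :
    ∀ (l : List String) (st : BSt), st.2.1.Nodup → (l.foldl bAdd st).2.1.Nodup := by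
  intro l
  induction l with
  | nil => intro st h; exact h
  | cons a as ih =>
    intro st h
    refine ih (bAdd st a) ?_
    unfold bAdd
    by_cases ha : a ∈ st.2.1
    · rw [if_pos ha]; exact h
    · rw [if_neg ha]; exact PySem.Set.nodup_add _ _ h

theorem nodup_foldl_bStep (rules : List (PySem.Set String × PySem.Set String)) :
    ∀ (st : BSt), st.2.1.Nodup → (rules.foldl bStep st).2.1.Nodup := by
  induction rules with
  | nil => intro st h; exact h
  | cons r rs ih =>
    intro st h
    refine ih (bStep st r) ?_
    unfold bStep
    by_cases hc : PySem.Set.issubset r.1 st.2.1 = true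
    · rw [if_pos hc]; exact nodup_bFire (r := r) r.2 st h
    · rw [if_neg hc]; exact h

-- the changed flag never falls back to false
theorem flag_bAdd {st : BSt} (h : st.2.2 = true) (a : String) : (bAdd st a).2.2 = true := by
  unfold bAdd
  by_cases ha : a ∈ st.2.1
  · rw [if_pos ha]; exact h
  · rw [if_neg ha]

theorem flag_bFire : ∀ (l : List String) (st : BSt), st.2.2 = true →
    (l.foldl bAdd st).2.2 = true := by
  intro l
  induction l with
  | nil => intro st h; exact h
  | cons a as ih => intro st h; exact ih (bAdd st a) (flag_bAdd h a)

theorem flag_bStep {st : BSt} (h : st.2.2 = true) (r : PySem.Set String × PySem.Set String) :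
    (bStep st r).2.2 = true := by
  unfold bStep
  by_cases hc : PySem.Set.issubset r.1 st.2.1 = true
  · rw [if_pos hc]; exact flag_bFire r.2 st h
  · rw [if_neg hc]; exact h

theorem flag_foldl_bStep (rules : List (PySem.Set String × PySem.Set String)) :
    ∀ (st : BSt), st.2.2 = true → (rules.foldl bStep st).2.2 = true := by
  induction rules with
  | nil => intro st h; exact h
  | cons r rs ih => intro st h; exact ih (bStep st r) (flag_bStep h r)

-- growth: a raised flag means 'have' strictly grew
theorem grow_bAdd (st : BSt) (a : String) :
    st.2.1.length ≤ (bAdd st a).2.1.length ∧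
    ((bAdd st a).2.2 = true → st.2.2 = true ∨ st.2.1.length < (bAdd st a).2.1.length) := by
  unfold bAdd
  by_cases ha : a ∈ st.2.1
  · rw [if_pos ha]; exact ⟨le_rfl, fun h => Or.inl h⟩
  · rw [if_neg ha]
    rw [PySem.Set.add_of_not_mem ha]
    simp only [List.length_append, List.length_singleton]
    exact ⟨by omega, fun _ => Or.inr (by omega)⟩

theorem grow_bFire : ∀ (l : List String) (st : BSt),
    st.2.1.length ≤ (l.foldl bAdd st).2.1.length ∧
    ((l.foldl bAdd st).2.2 = true → st.2.2 = true ∨ st.2.1.length < (l.foldl bAdd st).2.1.length) := by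
  intro l
  induction l with
  | nil => intro st; exact ⟨le_rfl, fun h => Or.inl h⟩
  | cons a as ih =>
    intro st
    obtain ⟨hle, hgr⟩ := ih (bAdd st a)
    obtain ⟨hle0, hgr0⟩ := grow_bAdd st a
    refine ⟨le_trans hle0 hle, ?_⟩
    intro h
    rcases hgr h with h1 | h1
    · rcases hgr0 h1 with h2 | h2
      · exact Or.inl h2
      · exact Or.inr (lt_of_lt_of_le h2 hle)
    · exact Or.inr (lt_of_le_of_lt hle0 h1)

theorem grow_bStep (st : BSt) (r : PySem.Set String × PySem.Set String) :
    st.2.1.length ≤ (bStep st r).2.1.length ∧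
    ((bStep st r).2.2 = true → st.2.2 = true ∨ st.2.1.length < (bStep st r).2.1.length) := by
  unfold bStep
  by_cases hc : PySem.Set.issubset r.1 st.2.1 = true
  · rw [if_pos hc]; exact grow_bFire r.2 st
  · rw [if_neg hc]; exact ⟨le_rfl, fun h => Or.inl h⟩

theorem grow_foldl_bStep (rules : List (PySem.Set String × PySem.Set String)) :
    ∀ (st : BSt),
    st.2.1.length ≤ (rules.foldl bStep st).2.1.length ∧
    ((rules.foldl bStep st).2.2 = true →
      st.2.2 = true ∨ st.2.1.length < (rules.foldl bStep st).2.1.length) := by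
  induction rules with
  | nil => intro st; exact ⟨le_rfl, fun h => Or.inl h⟩
  | cons r rs ih =>
    intro st
    obtain ⟨hle, hgr⟩ := ih (bStep st r)
    obtain ⟨hle0, hgr0⟩ := grow_bStep st r
    refine ⟨le_trans hle0 hle, ?_⟩
    intro h
    rcases hgr h with h1 | h1
    · rcases hgr0 h1 with h2 | h2
      · exact Or.inl h2
      · exact Or.inr (lt_of_lt_of_le h2 hle)
    · exact Or.inr (lt_of_le_of_lt hle0 h1)

-- a pass that ends with changed = False did nothing and certifies closedness
theorem fix_bFire : ∀ (l : List String) (st : BSt), (l.foldl bAdd st).2.2 = false →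
    l.foldl bAdd st = st ∧ ∀ a ∈ l, a ∈ st.2.1 := by
  intro l
  induction l with
  | nil => intro st h; exact ⟨rfl, by simp⟩
  | cons a as ih =>
    intro st h
    simp only [List.foldl_cons] at h ⊢
    by_cases ha : a ∈ st.2.1
    · have hb : bAdd st a = st := by unfold bAdd; rw [if_pos ha]
      rw [hb] at h ⊢
      obtain ⟨heq, hmem⟩ := ih st h
      refine ⟨heq, ?_⟩
      intro b hb'
      rcases List.mem_cons.mp hb' with h1 | h1
      · subst h1; exact ha
      · exact hmem b h1
    · exfalso
      have : (bAdd st a).2.2 = true := by unfold bAdd; rw [if_neg ha]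
      rw [flag_bFire as (bAdd st a) this] at h
      simp at h

theorem fix_bStep (st : BSt) (r : PySem.Set String × PySem.Set String)
    (h : (bStep st r).2.2 = false) :
    bStep st r = st ∧ (PySem.Set.issubset r.1 st.2.1 = true → ∀ a ∈ r.2, a ∈ st.2.1) := by
  unfold bStep at h ⊢
  by_cases hc : PySem.Set.issubset r.1 st.2.1 = true
  · rw [if_pos hc] at h ⊢
    obtain ⟨heq, hmem⟩ := fix_bFire r.2 st h
    exact ⟨heq, fun _ => hmem⟩
  · rw [if_neg hc] at h ⊢
    exact ⟨rfl, fun hcc => absurd hcc hc⟩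

theorem fix_foldl_bStep (rules : List (PySem.Set String × PySem.Set String)) :
    ∀ (st : BSt), (rules.foldl bStep st).2.2 = false →
    rules.foldl bStep st = st ∧
    ∀ r ∈ rules, PySem.Set.issubset r.1 st.2.1 = true → ∀ a ∈ r.2, a ∈ st.2.1 := by
  induction rules with
  | nil => intro st h; exact ⟨rfl, by simp⟩
  | cons r rs ih =>
    intro st h
    simp only [List.foldl_cons] at h ⊢
    by_cases hs : (bStep st r).2.2 = true
    · exfalso
      rw [flag_foldl_bStep rs (bStep st r) hs] at h
      simp at h
    · have hs' : (bStep st r).2.2 = false := by simpa using hs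
      obtain ⟨heq, hcl⟩ := fix_bStep st r hs'
      rw [heq] at h ⊢
      obtain ⟨heq2, hcl2⟩ := ih st h
      refine ⟨heq2, ?_⟩
      intro r' hr' hss
      rcases List.mem_cons.mp hr' with h1 | h1
      · subst h1; exact hcl hss
      · exact hcl2 r' h1 hss

-- with enough fuel the loop reaches a state closed under the rules
theorem closed_bLoopP {pool : List String} (rules : List (PySem.Set String × PySem.Set String))
    (hrp : ∀ r ∈ rules, r.2 ⊆ pool) :
    ∀ (n : Nat) (p : List String × PySem.Set String), p.2.Nodup → p.2 ⊆ pool →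
    pool.length + 1 ≤ n + p.2.length →
    ∀ r ∈ rules, (∀ b ∈ r.1, b ∈ (bLoopP rules n p).2) →
    ∀ a ∈ r.2, a ∈ (bLoopP rules n p).2 := by
  intro n
  induction n with
  | zero =>
    intro p hnd hpl hfuel
    have := nodup_subset_length hnd hpl
    omega
  | succ n ih =>
    intro p hnd hpl hfuel
    rw [bLoopP_succ]
    by_cases hc : (bPass rules p).2.2 = true
    · rw [if_pos hc]
      have hgrow : p.2.length < (bPass rules p).2.1.length := by
        rcases (grow_foldl_bStep rules (p.1, p.2, false)).2 hc with h | h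
        · exact absurd h Bool.false_ne_true
        · exact h
      refine ih ((bPass rules p).1, (bPass rules p).2.1)
        (nodup_foldl_bStep rules (p.1, p.2, false) hnd)
        (pool_foldl_bStep rules hrp (p.1, p.2, false) hpl) ?_
      show pool.length + 1 ≤ n + (bPass rules p).2.1.length
      omega
    · rw [if_neg hc]
      have hc' : (bPass rules p).2.2 = false := by simpa using hc
      obtain ⟨heq, hcl⟩ := fix_foldl_bStep rules (p.1, p.2, false) hc'
      have heq' : bPass rules p = (p.1, p.2, false) := heq
      rw [heq']
      intro r hr hb a ha
      exact hcl r hr ((PySem.Set.issubset_iff _ _).mpr hb) a ha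

-- main per-subset equality
theorem closureA_eq_bClosure (R : List String) (F : List (List String)) (S : List String) :
    closureA R F S = bClosure (F.map ruleOf) S := by
  set rules := F.map ruleOf with hrules
  set fuel := (rules.map (fun r => r.2.length)).sum + 1 with hfueldef
  set p0 : List String × PySem.Set String := (S, PySem.Set.ofList S) with hp0
  set p := bLoopP rules fuel p0 with hp
  set pool := PySem.Set.ofList S ++ rules.flatMap (fun r => r.2) with hpool
  have hrp : ∀ r ∈ rules, r.2 ⊆ pool := by
    intro r hr a ha
    exact List.mem_append_right _ (List.mem_flatMap.mpr ⟨r, hr, ha⟩)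
  have hgood0 : Good S p0.1 p0.2 := by
    refine ⟨PySem.Set.nodup_ofList _, fun x => PySem.Set.mem_ofList _ _, [], by rw [hp0]; simp, List.nodup_nil, by simp⟩
  have hgood : Good S p.1 p.2 := good_bLoopP rules fuel p0 hgood0
  have hfuelOK : pool.length + 1 ≤ fuel + p0.2.length := by
    have hlen : (rules.flatMap (fun r => r.2)).length
        = (rules.map (fun r => r.2.length)).sum := by
      simp [List.length_flatMap]
    show pool.length + 1 ≤ fuel + (PySem.Set.ofList S).length
    rw [hpool, List.length_append, hlen, hfueldef]
    omega
  have hclosed : ∀ r ∈ rules, (∀ b ∈ r.1, b ∈ p.2) → ∀ a ∈ r.2, a ∈ p.2 :=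
    closed_bLoopP rules hrp fuel p0 (PySem.Set.nodup_ofList _)
      (fun a ha => List.mem_append_left _ ha) hfuelOK
  have hsound : ∀ x ∈ p.2, Reach rules S x := by
    refine sound_bLoopP rules (fun r h => h) fuel p0 ?_
    intro x hx
    exact Reach.init ((PySem.Set.mem_ofList _ _).mp hx)
  have hScover : ∀ a ∈ S, a ∈ p.2 := by
    intro a ha
    obtain ⟨_, hmem, ext, hres, _, _⟩ := hgood
    exact (hmem a).mpr (hres ▸ List.mem_append_left _ ha)
  have hcomplete : ∀ a, Reach rules S a → a ∈ p.2 := reach_min hScover hclosed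
  obtain ⟨hvnd, hmem, extB, hresB, hndB, hdisB⟩ := hgood
  obtain ⟨extA, heqA, hndA, hdisA⟩ := closureGo_shape F.length F S
  have key : (closureGo F.length F S).Perm p.1 := by
    rw [heqA, hresB]
    apply List.Perm.append_left
    rw [List.perm_ext_iff_of_nodup hndA hndB]
    intro a
    constructor
    · intro ha
      have haR : Reach rules S a := by
        rw [← mem_closureGo_iff (F := F)]
        rw [heqA]; exact List.mem_append_right _ ha
      have : a ∈ p.1 := (hmem a).mp (hcomplete a haR)
      rw [hresB] at this
      rcases List.mem_append.mp this with h1 | h1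
      · exact absurd h1 (hdisA a ha)
      · exact h1
    · intro ha
      have haH : a ∈ p.2 := (hmem a).mpr (hresB ▸ List.mem_append_right _ ha)
      have haR : Reach rules S a := hsound a haH
      have : a ∈ closureGo F.length F S := mem_closureGo_iff.mpr haR
      rw [heqA] at this
      rcases List.mem_append.mp this with h1 | h1
      · exact absurd h1 (hdisB a ha)
      · exact h1
  unfold closureA bClosure
  exact (PySem.List.sorted_id_eq_sorted_id_iff_perm _ _).mpr key

-- ===== VERDICT (by name: the statement is the Claim_ definition above) =====
theorem all_closures_self_spec : Claim_equal_all_closures_self := by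
  intro R F _ _
  unfold Spec_all_closures_self all_closures_self all_closures_self_alt
  rw [PySem.List.foldl_append_eq_flatMap, List.nil_append]
  simp only [closureA_eq_bClosure]
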